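-- pv_equiv track=rewrite | github.com/saxyguy81/patternforge | src/patternforge/engine/tokens.py | _split_classchange
-- ===== SOURCE A (Python) =====
-- def _split_classchange(text: str) -> list[str]:
--     """Split on character class changes (alpha/digit/other)."""
--     chunks: list[str] = []
--     buf = []
--     prev = None
--     for ch in text:
--         category = "alpha" if ch.isalpha() else "digit" if ch.isdigit() else "other"
--         if prev is None or category == prev:
--             buf.append(ch)
--         else:
--             chunks.append("".join(buf))
--             buf = [ch]
--         prev = category
--     if buf:
--         chunks.append("".join(buf))
--     return chunks
-- ===== SOURCE B (Python) =====
-- def _classify(ch: str) -> str: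
--     return "alpha" if ch.isalpha() else "digit" if ch.isdigit() else "other"
--
--
-- def _split_classchange(text: str) -> list[str]:
--     """Split on character class changes (alpha/digit/other)."""
--     if not text:
--         return []
--     cuts = [0]
--     for i in range(1, len(text)):
--         if _classify(text[i]) != _classify(text[i - 1]):
--             cuts.append(i)
--     cuts.append(len(text))
--     return [text[i:j] for i, j in zip(cuts, cuts[1:])]
-- ===== Notes on version B (the rewrite author's own statement) =====
-- stated objective: alternative
-- what changed: Replaces A's single-pass prev/buf accumulator state machine with two staged passes: first compute the list of cut positions (indices where the class differs from the previous char), then slice the string between consecutive cut positions.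
import Mathlib
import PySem

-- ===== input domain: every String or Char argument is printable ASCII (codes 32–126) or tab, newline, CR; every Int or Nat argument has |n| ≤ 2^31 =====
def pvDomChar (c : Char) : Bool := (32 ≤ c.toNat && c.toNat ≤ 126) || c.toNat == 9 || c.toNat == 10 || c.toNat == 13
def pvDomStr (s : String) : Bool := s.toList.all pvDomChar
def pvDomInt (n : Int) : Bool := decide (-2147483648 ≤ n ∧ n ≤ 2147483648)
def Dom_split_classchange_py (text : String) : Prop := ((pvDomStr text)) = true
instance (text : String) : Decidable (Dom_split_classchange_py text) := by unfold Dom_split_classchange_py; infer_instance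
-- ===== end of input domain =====

-- B replaces A's prev/buf accumulator state machine with two staged passes (collect the
-- cut positions, then slice between consecutive cuts); alternative decomposition, same O(n) cost.


-- ===== PORT A =====
-- shared helper: the three-way character class (A's inline conditional, B's _classify)
def pvClass (ch : Char) : String :=
  if PySem.Chars.isalpha ch then "alpha" else if PySem.Chars.isdigit ch then "digit" else "other"

def pvStepA (st : List String × List Char × Option String) (ch : Char) :
    List String × List Char × Option String :=
  let category := pvClass ch
  match st with
  | (chunks, buf, none) => (chunks, buf ++ [ch], some category)
  | (chunks, buf, some p) =>
      if category = p then (chunks, buf ++ [ch], some category)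
      else (chunks ++ [String.mk buf], [ch], some category)

def split_classchange_py (text : String) : List String :=
  match text.toList.foldl pvStepA ([], [], none) with
  | (chunks, buf, _) => if buf ≠ [] then chunks ++ [String.mk buf] else chunks

-- ===== PORT B =====
def split_classchange_py_alt (text : String) : List String :=
  let l := text.toList
  if l = [] then []
  else
    let cuts : List Int :=
      (0 :: (PySem.List.pyRange 1 (l.length : Int) 1).filter
          (fun i => decide (pvClass (PySem.List.pyGetD l i ' ') ≠ pvClass (PySem.List.pyGetD l (i - 1) ' ')))) ++
        [(l.length : Int)]
    (cuts.zip (PySem.List.slice cuts (some 1) none)).map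
      (fun p => String.mk (PySem.List.slice l (some p.1) (some p.2)))

-- ===== PRECONDITION & SPEC =====
def Spec_split_classchange_py (text : String) (out : List String) : Prop := out = split_classchange_py_alt text
instance (text : String) (out : List String) : Decidable (Spec_split_classchange_py text out) := by unfold Spec_split_classchange_py; infer_instance

-- ===== CLAIM (what is proved, stated in full; the proofs are below) =====
def Claim_equal_split_classchange_py : Prop := ∀ (text : String), Dom_split_classchange_py text → Spec_split_classchange_py text (split_classchange_py text)

-- ===== LEMMAS AND PROOFS =====

-- canonical description of the result: maximal runs of equal class (proof-only)
def pvGroupBy (key : Char → String) : List Char → List (List Char)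
  | [] => []
  | c :: rest =>
      (c :: rest.takeWhile (fun d => key d = key c)) ::
        pvGroupBy key (rest.dropWhile (fun d => key d = key c))
termination_by l => l.length
decreasing_by
  simpa using Nat.lt_succ_of_le (List.length_dropWhile_le _ _)

-- A-side: the fold over a run, relative to an open buffer
lemma fold_run (l : List Char) (chunks : List String) (buf : List Char) (p : String)
    (hbuf : buf ≠ []) :
    (if (List.foldl pvStepA (chunks, buf, some p) l).2.1 ≠ [] then
      (List.foldl pvStepA (chunks, buf, some p) l).1 ++
        [String.mk (List.foldl pvStepA (chunks, buf, some p) l).2.1]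
    else (List.foldl pvStepA (chunks, buf, some p) l).1)
    = chunks ++ (String.mk (buf ++ l.takeWhile (fun d => pvClass d = p)) ::
        (pvGroupBy pvClass (l.dropWhile (fun d => pvClass d = p))).map String.mk) := by
  induction l generalizing chunks buf p with
  | nil => simp [pvGroupBy, hbuf]
  | cons c t ih =>
    by_cases h : pvClass c = p
    · simp only [List.foldl_cons, pvStepA, h, if_true, List.takeWhile_cons,
        List.dropWhile_cons, decide_true]
      rw [ih _ (buf ++ [c]) p (by simp)]
      simp
    · simp only [List.foldl_cons, pvStepA, List.takeWhile_cons, List.dropWhile_cons, h,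
        if_false, decide_false]
      rw [ih _ [c] (pvClass c) (by simp)]
      simp [pvGroupBy]

lemma A_eq_groupBy (text : String) :
    split_classchange_py text = (pvGroupBy pvClass text.toList).map String.mk := by
  unfold split_classchange_py
  cases htl : text.toList with
  | nil => simp [pvGroupBy]
  | cons c t =>
    simp only [List.foldl_cons, pvStepA, List.nil_append]
    rw [fold_run t [] [c] (pvClass c) (by simp)]
    simp [pvGroupBy]

-- B-side: the cut positions, as a structural recursion with an absolute offset
def bndsRec : List Char → Nat → List Nat
  | [], _ => []
  | [_], _ => []
  | a :: b :: t, i =>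
      if pvClass b ≠ pvClass a then (i + 1) :: bndsRec (b :: t) (i + 1)
      else bndsRec (b :: t) (i + 1)

lemma bndsRec_ge : ∀ (s : List Char) (i j : Nat), j ∈ bndsRec s i → i + 1 ≤ j
  | [], i, j => by simp [bndsRec]
  | [_], i, j => by simp [bndsRec]
  | a :: b :: t, i, j => by
      simp only [bndsRec]
      split_ifs with h
      · intro hm
        rcases List.mem_cons.1 hm with rfl | hm
        · omega
        · have := bndsRec_ge (b :: t) (i + 1) j hm; omega
      · intro hm
        have := bndsRec_ge (b :: t) (i + 1) j hm; omega

-- the filtered index range IS bndsRec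
lemma filter_range_eq_bndsRec : ∀ (t : List Char) (a : Char) (i : Nat),
    (List.range' (i + 1) t.length).filter
      (fun j => decide (pvClass ((a :: t).getD (j - i) ' ') ≠ pvClass ((a :: t).getD (j - i - 1) ' ')))
    = bndsRec (a :: t) i := by
  intro t
  induction t with
  | nil => intro a i; simp [bndsRec]
  | cons b t' ih =>
    intro a i
    rw [List.length_cons, List.range'_succ, List.filter_cons]
    have h1 : i + 1 - i = 1 := by omega
    rw [h1]
    have h0 : (1 : Nat) - 1 = 0 := by omega
    rw [h0]
    have hrest :
        (List.range' (i + 1 + 1) t'.length).filter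
          (fun j => decide (pvClass ((a :: b :: t').getD (j - i) ' ') ≠ pvClass ((a :: b :: t').getD (j - i - 1) ' ')))
        = (List.range' ((i + 1) + 1) t'.length).filter
          (fun j => decide (pvClass ((b :: t').getD (j - (i + 1)) ' ') ≠ pvClass ((b :: t').getD (j - (i + 1) - 1) ' '))) := by
      apply List.filter_congr
      intro j hj
      have hjge : (i + 1) + 1 ≤ j := (List.mem_range'_1.1 hj).1
      have e1 : j - i = (j - (i + 1)) + 1 := by omega
      have e2 : j - i - 1 = (j - (i + 1) - 1) + 1 := by omega
      rw [e2, e1, List.getD_cons_succ, List.getD_cons_succ]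
    rw [hrest, ih b (i + 1)]
    by_cases h : pvClass b = pvClass a
    · simp [bndsRec, h]
    · simp [bndsRec, h]

-- slicing between consecutive cuts yields the runs
lemma slices_bndsRec : ∀ (t : List Char) (a : Char) (i : Nat),
    ((i :: (bndsRec (a :: t) i ++ [i + t.length + 1])).zip (bndsRec (a :: t) i ++ [i + t.length + 1])).map
      (fun p => ((a :: t).drop (p.1 - i)).take (p.2 - p.1))
    = pvGroupBy pvClass (a :: t) := by
  intro t
  induction t with
  | nil =>
    intro a i
    simp [bndsRec, pvGroupBy]
  | cons b t' ih =>
    intro a i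
    by_cases h : pvClass b = pvClass a
    · -- same class: no cut between a and b
      have hb : bndsRec (a :: b :: t') i = bndsRec (b :: t') (i + 1) := by
        simp [bndsRec, h]
      rw [hb]
      have hlen : i + (b :: t').length + 1 = (i + 1) + t'.length + 1 := by
        simp; omega
      rw [hlen]
      -- the tail list of cuts is nonempty
      obtain ⟨h₀, r', hr⟩ : ∃ h₀ r', bndsRec (b :: t') (i + 1) ++ [(i + 1) + t'.length + 1] = h₀ :: r' := by
        cases hb2 : bndsRec (b :: t') (i + 1) with
        | nil => exact ⟨_, _, rfl⟩
        | cons x xs => exact ⟨x, xs ++ [(i + 1) + t'.length + 1], by simp⟩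
      have hh₀ : i + 1 ≤ h₀ := by
        have : h₀ ∈ bndsRec (b :: t') (i + 1) ++ [(i + 1) + t'.length + 1] := by
          rw [hr]; exact List.mem_cons_self
        rcases List.mem_append.1 this with hmem | hmem
        · have := bndsRec_ge _ _ _ hmem; omega
        · simp at hmem; omega
      have ihh := ih b (i + 1)
      rw [hr] at ihh ⊢
      -- structure of both zips
      rw [List.zip_cons_cons, List.map_cons] at ihh ⊢
      -- tail maps agree: every later start index is ≥ i + 1
      have htail :
          (List.map (fun p => ((a :: b :: t').drop (p.1 - i)).take (p.2 - p.1))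
              ((h₀ :: r').zip r'))
          = List.map (fun p => ((b :: t').drop (p.1 - (i + 1))).take (p.2 - p.1))
              ((h₀ :: r').zip r') := by
        apply List.map_congr_left
        intro p hp
        have hp1 : p.1 ∈ h₀ :: r' := (List.of_mem_zip hp).1
        have hge : i + 1 ≤ p.1 := by
          have : p.1 ∈ bndsRec (b :: t') (i + 1) ++ [(i + 1) + t'.length + 1] := by
            rw [hr]; exact hp1
          rcases List.mem_append.1 this with hmem | hmem
          · have := bndsRec_ge _ _ _ hmem; omega
          · simp at hmem; omega
        have e1 : p.1 - i = (p.1 - (i + 1)) + 1 := by omega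
        rw [e1, List.drop_succ_cons]
      rw [htail]
      -- head chunk: take one more character
      have hfirst : ((a :: b :: t').drop (i - i)).take (h₀ - i)
          = a :: ((b :: t').drop ((i + 1) - (i + 1))).take (h₀ - (i + 1)) := by
        have e0 : i - i = 0 := by omega
        have e0' : (i + 1) - (i + 1) = 0 := by omega
        have e1 : h₀ - i = (h₀ - (i + 1)) + 1 := by omega
        rw [e0, e0', e1, List.drop_zero, List.drop_zero, List.take_succ_cons]
      rw [hfirst]
      -- rewrite the groupby of the longer list using h
      have hgb : pvGroupBy pvClass (a :: b :: t')
          = (a :: (b :: List.takeWhile (fun d => pvClass d = pvClass b) t')) ::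
              pvGroupBy pvClass (List.dropWhile (fun d => pvClass d = pvClass b) t') := by
        rw [pvGroupBy]
        simp only [List.takeWhile_cons, List.dropWhile_cons, h, decide_true]
        simp
      rw [hgb]
      have hgb2 : pvGroupBy pvClass (b :: t')
          = (b :: List.takeWhile (fun d => pvClass d = pvClass b) t') ::
              pvGroupBy pvClass (List.dropWhile (fun d => pvClass d = pvClass b) t') := by
        rw [pvGroupBy]
      rw [hgb2] at ihh
      have hhead := (List.cons_eq_cons.1 ihh).1
      have htl := (List.cons_eq_cons.1 ihh).2
      rw [hhead, htl]
    · -- class change: cut at position i + 1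
      have hb : bndsRec (a :: b :: t') i = (i + 1) :: bndsRec (b :: t') (i + 1) := by
        simp [bndsRec, h]
      rw [hb]
      have hlen : i + (b :: t').length + 1 = (i + 1) + t'.length + 1 := by
        simp; omega
      rw [hlen]
      rw [List.cons_append, List.zip_cons_cons, List.map_cons]
      have hfirst : ((a :: b :: t').drop (i - i)).take ((i + 1) - i) = [a] := by
        have e0 : i - i = 0 := by omega
        have e1 : (i + 1) - i = 1 := by omega
        rw [e0, e1, List.drop_zero]
        rfl
      rw [hfirst]
      have ihh := ih b (i + 1)
      have htail :
          (List.map (fun p => ((a :: b :: t').drop (p.1 - i)).take (p.2 - p.1))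
              (((i + 1) :: (bndsRec (b :: t') (i + 1) ++ [(i + 1) + t'.length + 1])).zip
                (bndsRec (b :: t') (i + 1) ++ [(i + 1) + t'.length + 1])))
          = List.map (fun p => ((b :: t').drop (p.1 - (i + 1))).take (p.2 - p.1))
              (((i + 1) :: (bndsRec (b :: t') (i + 1) ++ [(i + 1) + t'.length + 1])).zip
                (bndsRec (b :: t') (i + 1) ++ [(i + 1) + t'.length + 1])) := by
        apply List.map_congr_left
        intro p hp
        have hp1 : p.1 ∈ (i + 1) :: (bndsRec (b :: t') (i + 1) ++ [(i + 1) + t'.length + 1]) :=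
          (List.of_mem_zip hp).1
        have hge : i + 1 ≤ p.1 := by
          rcases List.mem_cons.1 hp1 with heq | hmem
          · omega
          · rcases List.mem_append.1 hmem with hmem | hmem
            · have := bndsRec_ge _ _ _ hmem; omega
            · simp at hmem; omega
        have e1 : p.1 - i = (p.1 - (i + 1)) + 1 := by omega
        rw [e1, List.drop_succ_cons]
      rw [htail, ihh]
      have hgb : pvGroupBy pvClass (a :: b :: t')
          = [a] :: pvGroupBy pvClass (b :: t') := by
        rw [pvGroupBy]
        simp only [List.takeWhile_cons, List.dropWhile_cons, h, decide_false]
        simp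
      rw [hgb]

-- bridge: pyRange 1 n over Int is range' 1 (n-1) over Nat
lemma pyRange_one_eq_range' (n : Nat) :
    PySem.List.pyRange 1 (n : Int) 1 = (List.range' 1 (n - 1)).map (fun k : Nat => (k : Int)) := by
  induction n with
  | zero => simp [PySem.List.pyRange]
  | succ m ih =>
    cases Nat.eq_zero_or_pos m with
    | inl h0 => subst h0; simp [PySem.List.pyRange]
    | inr hpos =>
      have hc : ((m + 1 : Nat) : Int) = (m : Int) + 1 := by push_cast; ring
      rw [hc, PySem.List.pyRange_one_succ_right (by exact_mod_cast hpos), ih]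
      have hm : m + 1 - 1 = (m - 1) + 1 := by omega
      rw [hm, List.range'_concat]
      have h2 : 1 + 1 * (m - 1) = m := by omega
      rw [h2]
      simp

lemma B_eq_groupBy (text : String) :
    split_classchange_py_alt text = (pvGroupBy pvClass text.toList).map String.mk := by
  unfold split_classchange_py_alt
  cases htl : text.toList with
  | nil => simp [pvGroupBy]
  | cons a t =>
    simp only [if_neg (List.cons_ne_nil a t)]
    rw [pyRange_one_eq_range']
    rw [List.filter_map]
    have hpred :
        (List.range' 1 ((a :: t).length - 1)).filter
          ((fun i => decide (pvClass (PySem.List.pyGetD (a :: t) i ' ') ≠ pvClass (PySem.List.pyGetD (a :: t) (i - 1) ' '))) ∘ (fun k : Nat => (k : Int)))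
        = (List.range' 1 t.length).filter
          (fun j => decide (pvClass ((a :: t).getD (j - 0) ' ') ≠ pvClass ((a :: t).getD (j - 0 - 1) ' '))) := by
      have hl : (a :: t).length - 1 = t.length := by simp
      rw [hl]
      apply List.filter_congr
      intro j hj
      have hjge : 1 ≤ j := (List.mem_range'_1.1 hj).1
      have hcast : ((j : Int) - 1) = ((j - 1 : Nat) : Int) := by omega
      simp only [Function.comp, hcast, PySem.List.pyGetD_natCast]
      simp
    rw [hpred, filter_range_eq_bndsRec t a 0]
    -- assemble the cut list as a cast of a Nat list
    have hcuts : (0 : Int) :: (bndsRec (a :: t) 0).map (fun k : Nat => (k : Int)) ++ [((a :: t).length : Int)]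
        = ((0 :: bndsRec (a :: t) 0 ++ [(a :: t).length]).map (fun k : Nat => (k : Int))) := by
      simp
    rw [hcuts, PySem.List.slice_from_one, ← List.map_tail]
    have htail : (0 :: bndsRec (a :: t) 0 ++ [(a :: t).length]).tail
        = bndsRec (a :: t) 0 ++ [(a :: t).length] := by
      simp
    rw [htail, List.zip_map, List.map_map]
    have hmap :
        (((0 :: bndsRec (a :: t) 0 ++ [(a :: t).length]).zip (bndsRec (a :: t) 0 ++ [(a :: t).length])).map
          ((fun p => String.mk (PySem.List.slice (a :: t) (some p.1) (some p.2))) ∘ Prod.map (fun k : Nat => (k : Int)) (fun k : Nat => (k : Int))))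
        = ((0 :: bndsRec (a :: t) 0 ++ [(a :: t).length]).zip (bndsRec (a :: t) 0 ++ [(a :: t).length])).map
          (fun p => String.mk (((a :: t).drop (p.1 - 0)).take (p.2 - p.1))) := by
      apply List.map_congr_left
      intro p _
      simp only [Function.comp, Prod.map, PySem.List.slice_natCast]
      simp
    rw [hmap]
    have hlen : (a :: t).length = 0 + t.length + 1 := by simp
    rw [hlen]
    have := slices_bndsRec t a 0
    calc ((0 :: bndsRec (a :: t) 0 ++ [0 + t.length + 1]).zip (bndsRec (a :: t) 0 ++ [0 + t.length + 1])).map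
          (fun p => String.mk (((a :: t).drop (p.1 - 0)).take (p.2 - p.1)))
        = (((0 :: (bndsRec (a :: t) 0 ++ [0 + t.length + 1])).zip (bndsRec (a :: t) 0 ++ [0 + t.length + 1])).map
            (fun p => ((a :: t).drop (p.1 - 0)).take (p.2 - p.1))).map String.mk := by
          rw [List.map_map]; rfl
      _ = (pvGroupBy pvClass (a :: t)).map String.mk := by rw [this]

-- ===== VERDICT (by name: the statement is the Claim_ definition above) =====
theorem split_classchange_py_spec : Claim_equal_split_classchange_py := by
  intro text _
  unfold Spec_split_classchange_py
  rw [A_eq_groupBy, B_eq_groupBy]
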